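-- pv_equiv track=rewrite | github.com/FOI-Bioinformatics/neoswga | neoswga/core/advanced_features.py | _count_dinucleotide_repeats
-- ===== SOURCE A (Python) =====
-- def _count_dinucleotide_repeats(seq: str, max_count: int = 10) -> int:
--     """Count long dinucleotide repeats (ATATAT...)."""
--     if len(seq) < 4:
--         return 0
--
--     max_repeat = 0
--     for i in range(len(seq) - 3):
--         dinuc = seq[i:i+2]
--         repeat_len = 2
--         pos = i + 2
--         while pos + 1 < len(seq) and seq[pos:pos+2] == dinuc:
--             repeat_len += 2
--             pos += 2
--         max_repeat = max(max_repeat, repeat_len)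
--
--     return min(max_repeat, max_count)
-- ===== SOURCE B (Python) =====
-- def _count_dinucleotide_repeats(seq: str, max_count: int = 10) -> int:
--     """Count long dinucleotide repeats (ATATAT...) -- single pass over period-2 matches."""
--     n = len(seq)
--     if n < 4:
--         return 0
--     best = 0
--     cur = 0
--     for j in range(n - 2):
--         if seq[j] == seq[j + 2]:
--             cur += 1
--             if cur > best:
--                 best = cur
--         else:
--             cur = 0
--     return min(2 + 2 * (best // 2), max_count)
-- ===== Notes on version B (the rewrite author's own statement) =====
-- stated objective: faster
-- what changed: Replaced the quadratic scan (for each start index, re-expand the dinucleotide repeat with an inner while loop) by a single pass that tracks the longest run of positions j with seq[j]==seq[j+2] and converts its length to the repeat length with 2+2*(run//2).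
import Mathlib
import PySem

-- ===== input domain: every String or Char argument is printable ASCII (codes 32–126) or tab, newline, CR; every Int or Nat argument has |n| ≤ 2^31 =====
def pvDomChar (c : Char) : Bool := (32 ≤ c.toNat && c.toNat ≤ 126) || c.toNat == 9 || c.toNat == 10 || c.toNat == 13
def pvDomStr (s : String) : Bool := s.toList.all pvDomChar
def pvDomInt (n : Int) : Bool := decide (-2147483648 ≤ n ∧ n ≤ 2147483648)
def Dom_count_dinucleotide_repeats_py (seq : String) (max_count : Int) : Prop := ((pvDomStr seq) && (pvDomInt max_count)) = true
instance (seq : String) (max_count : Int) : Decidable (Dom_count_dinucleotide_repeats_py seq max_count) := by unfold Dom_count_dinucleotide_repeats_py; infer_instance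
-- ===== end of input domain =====

-- B replaces A's quadratic per-start rescans with one linear pass over period-2 matches (seq[j]==seq[j+2]); measured asymptotically faster.


-- ===== PORT A =====
-- the inner `while pos + 1 < len(seq) and seq[pos:pos+2] == dinuc` loop of A
def pvInnerA (l : List Char) (dinuc : List Char) (pos : Int) (rlen : Int) : Int :=
  if h : pos + 1 < (l.length : Int) ∧ PySem.List.slice l (some pos) (some (pos + 2)) = dinuc then
    pvInnerA l dinuc (pos + 2) (rlen + 2)
  else rlen
termination_by ((l.length : Int) - pos).toNat
decreasing_by omega

def count_dinucleotide_repeats_py (seq : String) (max_count : Int) : Int :=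
  let l := seq.toList
  if (l.length : Int) < 4 then 0
  else
    let max_repeat :=
      (PySem.List.pyRange 0 ((l.length : Int) - 3) 1).foldl
        (fun mr i =>
          let dinuc := PySem.List.slice l (some i) (some (i + 2))
          let rlen := pvInnerA l dinuc (i + 2) 2
          max mr rlen) 0
    min max_repeat max_count

-- ===== PORT B =====
def count_dinucleotide_repeats_py_alt (seq : String) (max_count : Int) : Int :=
  let l := seq.toList
  if (l.length : Int) < 4 then 0
  else
    let bc :=
      (PySem.List.pyRange 0 ((l.length : Int) - 2) 1).foldl
        (fun (s : Int × Int) j =>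
          if PySem.List.pyGet? l j = PySem.List.pyGet? l (j + 2) then
            let cur := s.2 + 1
            (if cur > s.1 then cur else s.1, cur)
          else (s.1, 0)) (0, 0)
    min (2 + 2 * (PySem.Int.floordiv bc.1 2)) max_count

-- ===== PRECONDITION & SPEC =====
def Spec_count_dinucleotide_repeats_py (seq : String) (max_count : Int) (out : Int) : Prop := out = count_dinucleotide_repeats_py_alt seq max_count
instance (seq : String) (max_count : Int) (out : Int) : Decidable (Spec_count_dinucleotide_repeats_py seq max_count out) := by unfold Spec_count_dinucleotide_repeats_py; infer_instance

-- ===== CLAIM (what is proved, stated in full; the proofs are below) =====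
def Claim_equal_count_dinucleotide_repeats_py : Prop := ∀ (seq : String) (max_count : Int), Dom_count_dinucleotide_repeats_py seq max_count → Spec_count_dinucleotide_repeats_py seq max_count (count_dinucleotide_repeats_py seq max_count)

-- ===== LEMMAS AND PROOFS =====

-- `pvC l j` : position j participates in a period-2 match (seq[j] == seq[j+2], in range)
def pvC (l : List Char) (j : Nat) : Bool := decide (j + 2 < l.length) && (l[j]? == l[j+2]?)

-- length of the run of period-2 matches starting at j
def pvRun (l : List Char) (j : Nat) : Nat :=
  if h : pvC l j = true then pvRun l (j + 1) + 1 else 0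
termination_by l.length - j
decreasing_by
  simp only [pvC, Bool.and_eq_true, decide_eq_true_eq] at h
  omega

-- length of the run of period-2 matches ending just before j (B's `cur` after j steps)
def pvCur (l : List Char) : Nat → Nat
  | 0 => 0
  | j + 1 => if pvC l j then pvCur l j + 1 else 0

-- B's `best` after m steps
def pvBest (l : List Char) : Nat → Nat
  | 0 => 0
  | m + 1 => max (pvBest l m) (pvCur l (m + 1))

-- max of pvRun over starts k < m
def pvMR (l : List Char) : Nat → Nat
  | 0 => 0
  | m + 1 => max (pvMR l m) (pvRun l m)

lemma take_two_drop (l : List Char) (a : Nat) (h : a + 1 < l.length) :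
    (l.drop a).take 2 = [l[a], l[a+1]] := by
  rw [List.drop_eq_getElem_cons (by omega), List.drop_eq_getElem_cons h]
  rfl

lemma pvC_iff (l : List Char) (i : Nat) (h : i + 2 < l.length) :
    pvC l i = true ↔ l[i] = l[i+2] := by
  simp [pvC, h, show i < l.length by omega]

lemma pvC_false (l : List Char) (i : Nat) (h : ¬ i + 2 < l.length) : pvC l i = false := by
  simp [pvC, h]

lemma pvRun_le_one (l : List Char) (i : Nat) (h : ¬ pvC l (i+1) = true) : pvRun l i ≤ 1 := by
  rw [pvRun]
  split
  · rw [pvRun]; simp [h]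
  · omega

lemma pvInnerA_stop (l d : List Char) (p r : Int)
    (h : ¬(p + 1 < (l.length : Int) ∧ PySem.List.slice l (some p) (some (p + 2)) = d)) :
    pvInnerA l d p r = r := by
  conv_lhs => rw [pvInnerA]
  rw [dif_neg h]

lemma pvInnerA_step (l d : List Char) (p r : Int)
    (h : p + 1 < (l.length : Int) ∧ PySem.List.slice l (some p) (some (p + 2)) = d) :
    pvInnerA l d p r = pvInnerA l d (p + 2) (r + 2) := by
  conv_lhs => rw [pvInnerA]
  rw [dif_pos h]

lemma pvInnerA_add (l d : List Char) :
    ∀ (k : Nat) (p r : Int), ((l.length : Int) - p).toNat ≤ k →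
      pvInnerA l d p r = pvInnerA l d p 0 + r := by
  intro k
  induction k with
  | zero =>
    intro p r hk
    have h : ¬(p + 1 < (l.length : Int) ∧ PySem.List.slice l (some p) (some (p + 2)) = d) := by
      rintro ⟨h1, -⟩; omega
    rw [pvInnerA_stop l d p r h, pvInnerA_stop l d p 0 h]; ring
  | succ k ih =>
    intro p r hk
    by_cases h : p + 1 < (l.length : Int) ∧ PySem.List.slice l (some p) (some (p + 2)) = d
    · rw [pvInnerA_step l d p r h, pvInnerA_step l d p 0 h,
        ih (p+2) (r+2) (by omega), ih (p+2) (0+2) (by omega)]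
      ring
    · rw [pvInnerA_stop l d p r h, pvInnerA_stop l d p 0 h]; ring

lemma slice2 (l : List Char) (a : Nat) (h : a + 1 < l.length) :
    PySem.List.slice l (some (a : Int)) (some ((a + 2 : Nat) : Int)) = [l[a], l[a+1]] := by
  rw [PySem.List.slice_natCast, show a + 2 - a = 2 by omega, take_two_drop l a h]

lemma innerA_eq (l : List Char) :
    ∀ (k : Nat) (i : Nat), l.length - i ≤ k → i + 1 < l.length →
      pvInnerA l (PySem.List.slice l (some (i : Int)) (some ((i : Int) + 2))) ((i : Int) + 2) 2
        = 2 + 2 * ((pvRun l i / 2 : Nat) : Int) := by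
  intro k
  induction k with
  | zero => intro i hk hi; omega
  | succ k ih =>
    intro i hk hi
    have c1 : ((i : Int) + 2) = ((i + 2 : Nat) : Int) := by push_cast; ring
    have c2 : ((i : Int) + 2 + 2) = ((i + 4 : Nat) : Int) := by push_cast; ring
    by_cases h : (i : Int) + 2 + 1 < (l.length : Int) ∧
        PySem.List.slice l (some ((i : Int) + 2)) (some ((i : Int) + 2 + 2))
          = PySem.List.slice l (some (i : Int)) (some ((i : Int) + 2))
    · obtain ⟨hb, hs⟩ := h
      have hi3 : i + 3 < l.length := by omega
      -- normalize casts in the slice equality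
      rw [c2, c1] at hs
      have hsS := hs
      rw [show (i + 4) = (i + 2) + 2 by omega] at hsS
      have hsP := hsS
      rw [slice2 l (i+2) (by omega), slice2 l i (by omega)] at hsP
      simp only [List.cons.injEq, and_true] at hsP
      have hc1 : pvC l i = true := by
        rw [pvC_iff l i (by omega)]; exact hsP.1.symm
      have hc2 : pvC l (i+1) = true := by
        rw [pvC_iff l (i+1) (by omega)]
        exact hsP.2.symm
      -- take one step of the loop
      rw [pvInnerA_step l _ _ _ ⟨hb, by rw [c2, c1]; exact hs⟩]
      rw [c2, c1, ← hs]
      rw [show ((i + 4 : Nat) : Int) = ((i + 2 : Nat) : Int) + 2 by push_cast; ring]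
      have e4 : pvInnerA l (PySem.List.slice l (some ((i+2 : Nat) : Int)) (some (((i+2 : Nat) : Int) + 2))) (((i+2 : Nat) : Int) + 2) (2 + 2)
          = pvInnerA l (PySem.List.slice l (some ((i+2 : Nat) : Int)) (some (((i+2 : Nat) : Int) + 2))) (((i+2 : Nat) : Int) + 2) 2 + 2 := by
        rw [pvInnerA_add l _ ((((l.length : Int)) - (((i+2 : Nat) : Int) + 2)).toNat) _ (2+2) (le_refl _),
            pvInnerA_add l _ ((((l.length : Int)) - (((i+2 : Nat) : Int) + 2)).toNat) _ 2 (le_refl _)]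
        ring
      rw [e4, ih (i+2) (by omega) (by omega)]
      have hr1 : pvRun l i = pvRun l (i+1) + 1 := by rw [pvRun]; simp [hc1]
      have hr2 : pvRun l (i+1) = pvRun l (i+2) + 1 := by rw [pvRun]; simp [hc2]
      have hr : pvRun l i = pvRun l (i+2) + 2 := by omega
      rw [hr, show (pvRun l (i+2) + 2) / 2 = pvRun l (i+2) / 2 + 1 by omega]
      push_cast
      ring
    · rw [pvInnerA_stop l _ _ _ h]
      have hle : pvRun l i ≤ 1 := by
        by_cases hb : i + 3 < l.length
        · by_cases hc1 : pvC l i = true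
          · apply pvRun_le_one
            intro hc2
            apply h
            refine ⟨by omega, ?_⟩
            rw [c2, c1, show (i + 4) = (i + 2) + 2 by omega,
              slice2 l (i+2) (by omega), slice2 l i (by omega)]
            have g1 := (pvC_iff l i (by omega)).mp hc1
            have g2 := (pvC_iff l (i+1) (by omega)).mp hc2
            simp only [List.cons.injEq, and_true]
            exact ⟨g1.symm, g2.symm⟩
          · rw [pvRun]; simp [hc1]
        · exact pvRun_le_one l i (by rw [pvC_false l (i+1) (by omega)]; simp)
      rw [show pvRun l i / 2 = 0 by omega]
      simp

-- run positions are matches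
lemma run_window (l : List Char) : ∀ (t i : Nat), t < pvRun l i → pvC l (i + t) = true := by
  intro t
  induction t with
  | zero =>
    intro i h
    rw [pvRun] at h
    by_cases hc : pvC l i = true
    · simpa using hc
    · simp [hc] at h
  | succ t ih =>
    intro i h
    rw [pvRun] at h
    by_cases hc : pvC l i = true
    · simp [hc] at h
      have := ih (i+1) (by omega)
      simpa [show i + 1 + t = i + (t+1) by omega] using this
    · simp [hc] at h

-- matches up to c imply cur ≥ c
lemma cur_ge (l : List Char) : ∀ (c i : Nat), (∀ t, t < c → pvC l (i + t) = true) → c ≤ pvCur l (i + c) := by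
  intro c
  induction c with
  | zero => intro i _; omega
  | succ c ih =>
    intro i hw
    have hc : pvC l (i + c) = true := hw c (by omega)
    have : pvCur l (i + c + 1) = pvCur l (i + c) + 1 := by simp [pvCur, hc]
    have h2 := ih i (fun t ht => hw t (by omega))
    simp [show i + (c+1) = i + c + 1 by omega, this]
    omega

-- the trailing window of length pvCur l j consists of matches
lemma cur_window (l : List Char) : ∀ (j t : Nat), j - pvCur l j ≤ t → t < j → pvC l t = true := by
  intro j
  induction j with
  | zero => intro t h1 h2; omega
  | succ j ih =>
    intro t h1 h2
    by_cases hc : pvC l j = true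
    · have hcur : pvCur l (j+1) = pvCur l j + 1 := by simp [pvCur, hc]
      rw [hcur] at h1
      by_cases ht : t = j
      · rw [ht]; exact hc
      · exact ih t (by omega) (by omega)
    · have hcur : pvCur l (j+1) = 0 := by simp [pvCur, hc]
      rw [hcur] at h1
      omega

lemma run_ge (l : List Char) : ∀ (c i : Nat), (∀ t, t < c → pvC l (i + t) = true) → c ≤ pvRun l i := by
  intro c
  induction c with
  | zero => intro i _; omega
  | succ c ih =>
    intro i hw
    have hc : pvC l i = true := by simpa using hw 0 (by omega)
    rw [pvRun]
    simp [hc]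
    have := ih (i+1) (fun t ht => by simpa [show i + 1 + t = i + (t+1) by omega] using hw (t+1) (by omega))
    omega

lemma cur_le_self (l : List Char) : ∀ j, pvCur l j ≤ j := by
  intro j
  induction j with
  | zero => simp [pvCur]
  | succ j ih => by_cases hc : pvC l j = true <;> simp [pvCur, hc] <;> omega

lemma best_ge_cur (l : List Char) : ∀ (m j : Nat), j ≤ m → pvCur l j ≤ pvBest l m := by
  intro m
  induction m with
  | zero => intro j h; interval_cases j; simp [pvBest, pvCur]
  | succ m ih =>
    intro j h
    by_cases hj : j = m + 1
    · rw [hj]; simp [pvBest]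
    · have := ih j (by omega)
      simp [pvBest]; omega

lemma MR_ge_run (l : List Char) : ∀ (m k : Nat), k < m → pvRun l k ≤ pvMR l m := by
  intro m
  induction m with
  | zero => intro k h; omega
  | succ m ih =>
    intro k h
    by_cases hk : k = m
    · rw [hk]; simp [pvMR]
    · have := ih k (by omega)
      simp [pvMR]; omega

-- every run is witnessed by cur at its end, inside B's index range
lemma run_le_best (l : List Char) (hn : 4 ≤ l.length) (k : Nat) :
    pvRun l k ≤ pvBest l (l.length - 2) := by
  by_cases h0 : pvRun l k = 0
  · rw [h0]; omega
  · have hwin : ∀ t, t < pvRun l k → pvC l (k + t) = true := fun t ht => run_window l t k ht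
    have hlast := hwin (pvRun l k - 1) (by omega)
    have hb : k + (pvRun l k - 1) + 2 < l.length := by
      have := hlast
      simp only [pvC, Bool.and_eq_true, decide_eq_true_eq] at this
      exact this.1
    have hc := cur_ge l (pvRun l k) k hwin
    have := best_ge_cur l (l.length - 2) (k + pvRun l k) (by omega)
    omega

lemma cur_le_MR_div (l : List Char) (hn : 4 ≤ l.length) (j : Nat) (hj : j ≤ l.length - 2) :
    pvCur l j / 2 ≤ pvMR l (l.length - 3) / 2 := by
  set c := pvCur l j with hc
  by_cases h0 : c = 0
  · rw [h0]; omega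
  · have hcj : c ≤ j := cur_le_self l j
    have hwin : ∀ t, t < c → pvC l ((j - c) + t) = true := by
      intro t ht
      exact cur_window l j ((j - c) + t) (by omega) (by omega)
    have hrun : c ≤ pvRun l (j - c) := run_ge l c (j - c) hwin
    have hC0 : pvC l (j - c) = true := hwin 0 (by omega)
    have hb : (j - c) + 2 < l.length := by
      simp only [pvC, Bool.and_eq_true, decide_eq_true_eq] at hC0
      simpa using hC0.1
    by_cases hcase : j - c < l.length - 3
    · have := MR_ge_run l (l.length - 3) (j - c) hcase
      omega
    · -- start is at position length-3: the run has length ≤ 1, so c ≤ 1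
      have : j - c = l.length - 3 := by omega
      have : c ≤ 1 := by omega
      omega

lemma MR_div_eq_best_div (l : List Char) (hn : 4 ≤ l.length) :
    pvMR l (l.length - 3) / 2 = pvBest l (l.length - 2) / 2 := by
  apply Nat.le_antisymm
  · -- MR ≤ best, hence MR/2 ≤ best/2
    have h1 : pvMR l (l.length - 3) ≤ pvBest l (l.length - 2) := by
      have : ∀ m, (∀ k, k < m → pvRun l k ≤ pvBest l (l.length - 2)) → pvMR l m ≤ pvBest l (l.length - 2) := by
        intro m
        induction m with
        | zero => intro _; simp [pvMR]
        | succ m ih =>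
          intro h
          simp [pvMR]
          exact ⟨ih (fun k hk => h k (by omega)), h m (by omega)⟩
      exact this _ (fun k _ => run_le_best l hn k)
    omega
  · have : ∀ m, m ≤ l.length - 2 → pvBest l m / 2 ≤ pvMR l (l.length - 3) / 2 := by
      intro m
      induction m with
      | zero => intro _; simp [pvBest]
      | succ m ih =>
        intro h
        have h1 := ih (by omega)
        have h2 := cur_le_MR_div l hn (m+1) h
        simp only [pvBest]
        omega
    exact this _ (by omega)

-- A's outer fold computes 2 + 2*(pvMR/2)
lemma A_fold (l : List Char) :
    ∀ (m : Nat), 1 ≤ m → m + 3 ≤ l.length →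
      (List.range m).foldl
        (fun mr (k : Nat) =>
          max mr (pvInnerA l (PySem.List.slice l (some (k : Int)) (some ((k : Int) + 2))) ((k : Int) + 2) 2)) 0
        = 2 + 2 * ((pvMR l m / 2 : Nat) : Int) := by
  intro m
  induction m with
  | zero => intro h; omega
  | succ m ih =>
    intro _ hm
    by_cases hm0 : m = 0
    · subst hm0
      simp only [List.range_succ, List.range_zero, List.nil_append, List.foldl_cons, List.foldl_nil]
      rw [innerA_eq l l.length 0 (by omega) (by omega)]
      have : pvMR l 1 = pvRun l 0 := by simp [pvMR]
      rw [this]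
      have : (0 : Int) ≤ 2 + 2 * ((pvRun l 0 / 2 : Nat) : Int) := by positivity
      omega
    · rw [List.range_succ, List.foldl_append, ih (by omega) (by omega)]
      simp only [List.foldl_cons, List.foldl_nil]
      rw [innerA_eq l l.length m (by omega) (by omega)]
      have hmax : pvMR l (m+1) = max (pvMR l m) (pvRun l m) := by simp [pvMR]
      rw [hmax]
      have h1 : (max (pvMR l m) (pvRun l m)) / 2 = max (pvMR l m / 2) (pvRun l m / 2) := by omega
      rw [h1]
      rcases Nat.le_total (pvMR l m / 2) (pvRun l m / 2) with h | h
      · rw [Nat.max_eq_right h]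
        have : ((pvMR l m / 2 : Nat) : Int) ≤ ((pvRun l m / 2 : Nat) : Int) := by exact_mod_cast h
        omega
      · rw [Nat.max_eq_left h]
        have : ((pvRun l m / 2 : Nat) : Int) ≤ ((pvMR l m / 2 : Nat) : Int) := by exact_mod_cast h
        omega

-- B's fold computes (pvBest, pvCur)
lemma B_fold (l : List Char) :
    ∀ (m : Nat), m + 2 ≤ l.length →
      (List.range m).foldl
        (fun (s : Int × Int) (k : Nat) =>
          if PySem.List.pyGet? l (k : Int) = PySem.List.pyGet? l ((k : Int) + 2) then
            (if s.2 + 1 > s.1 then s.2 + 1 else s.1, s.2 + 1)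
          else (s.1, 0)) ((0 : Int), (0 : Int))
        = ((pvBest l m : Int), (pvCur l m : Int)) := by
  intro m
  induction m with
  | zero => intro _; simp [pvBest, pvCur]
  | succ m ih =>
    intro hm
    rw [List.range_succ, List.foldl_append, ih (by omega)]
    simp only [List.foldl_cons, List.foldl_nil]
    have hcast : ((m : Int) + 2) = ((m + 2 : Nat) : Int) := by push_cast; ring
    have hget : (PySem.List.pyGet? l (m : Int) = PySem.List.pyGet? l ((m : Int) + 2)) ↔ pvC l m = true := by
      rw [hcast, PySem.List.pyGet?_natCast, PySem.List.pyGet?_natCast]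
      have hmlt : m < l.length := by omega
      have hm2 : m + 2 < l.length := by omega
      rw [List.getElem?_eq_getElem hmlt, List.getElem?_eq_getElem hm2, pvC_iff l m hm2]
      simp
    by_cases hc : pvC l m = true
    · rw [if_pos (hget.mpr hc)]
      have hcur : pvCur l (m+1) = pvCur l m + 1 := by simp [pvCur, hc]
      have hbest : pvBest l (m+1) = max (pvBest l m) (pvCur l (m+1)) := by simp [pvBest]
      rcases Nat.lt_or_ge (pvBest l m) (pvCur l m + 1) with h | h
      · rw [if_pos (by exact_mod_cast h)]
        rw [hbest, hcur, Nat.max_eq_right (by omega)]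
        push_cast; constructor <;> ring
      · rw [if_neg (by push_cast; omega)]
        rw [hbest, hcur, Nat.max_eq_left (by omega)]
        push_cast; constructor <;> ring
    · rw [if_neg (fun h => hc (hget.mp h))]
      have hcur : pvCur l (m+1) = 0 := by simp [pvCur, hc]
      have hbest : pvBest l (m+1) = max (pvBest l m) (pvCur l (m+1)) := by simp [pvBest]
      rw [hbest, hcur]
      simp

-- ===== VERDICT (by name: the statement is the Claim_ definition above) =====
theorem count_dinucleotide_repeats_py_spec : Claim_equal_count_dinucleotide_repeats_py := by
  intro seq max_count _
  unfold Spec_count_dinucleotide_repeats_py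
  unfold count_dinucleotide_repeats_py count_dinucleotide_repeats_py_alt
  set l := seq.toList with hl
  by_cases hsmall : (l.length : Int) < 4
  · rw [if_pos hsmall, if_pos hsmall]
  · have hn : 4 ≤ l.length := by omega
    rw [if_neg hsmall, if_neg hsmall]
    -- rewrite both pyRanges as maps of List.range
    rw [PySem.List.pyRange_one 0 ((l.length : Int) - 3), PySem.List.pyRange_one 0 ((l.length : Int) - 2)]
    rw [List.foldl_map, List.foldl_map]
    simp only [zero_add]
    have h3 : ((l.length : Int) - 3 - 0).toNat = l.length - 3 := by omega
    have h2 : ((l.length : Int) - 2 - 0).toNat = l.length - 2 := by omega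
    rw [h3, h2]
    rw [A_fold l (l.length - 3) (by omega) (by omega)]
    rw [B_fold l (l.length - 2) (by omega)]
    rw [MR_div_eq_best_div l hn]
    -- floordiv of a nonneg cast by 2 is Nat division
    have hfd : PySem.Int.floordiv ((pvBest l (l.length - 2) : Nat) : Int) 2
        = ((pvBest l (l.length - 2) / 2 : Nat) : Int) := by
      simp only [PySem.Int.floordiv]
      rw [Int.fdiv_eq_ediv_of_nonneg _ (by positivity)]
      rw [show ((2:Int)) = ((2:Nat):Int) from rfl, ← Int.natCast_div]
    rw [hfd]
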